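-- pv_equiv track=rewrite | github.com/sukhithms25/git_ai | main.py | find_relevant_files
-- ===== SOURCE A (Python) =====
-- MAX_RELEVANT_FILES = 5
--
-- def find_relevant_files(all_files: list[str], keywords: list[str]) -> list[str]:
--     kw_lower = [kw.lower() for kw in keywords]
--
--     def score(fp: str) -> int:
--         return sum(1 for kw in kw_lower if kw in fp.lower())
--
--     scored = sorted([(f, score(f)) for f in all_files], key=lambda x: x[1], reverse=True)
--     matched = [f for f, s in scored if s > 0]
--     if not matched:
--         matched = [f for f, _ in scored[:MAX_RELEVANT_FILES]]
--     return matched[:MAX_RELEVANT_FILES]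
-- ===== SOURCE B (Python) =====
-- MAX_RELEVANT_FILES = 5
--
-- def find_relevant_files(all_files: list[str], keywords: list[str]) -> list[str]:
--     kw_lower = [kw.lower() for kw in keywords]
--     buckets = {}
--     for f in all_files:
--         fl = f.lower()
--         s = sum(1 for kw in kw_lower if kw in fl)
--         buckets.setdefault(s, []).append(f)
--     matched = []
--     for s in range(len(keywords), 0, -1):
--         matched.extend(buckets.get(s, []))
--     if not matched:
--         matched = all_files[:MAX_RELEVANT_FILES]
--     return matched[:MAX_RELEVANT_FILES]
-- ===== Notes on version B (the rewrite author's own statement) =====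
-- stated objective: alternative
-- what changed: Replaces A's stable reverse sort of (file, score) pairs followed by a filter with a single scoring pass that appends each file into a score-keyed dict bucket, then a sweep over scores from len(keywords) down to 1 concatenating buckets (a counting/bucket sort over the bounded score range).
import Mathlib
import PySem

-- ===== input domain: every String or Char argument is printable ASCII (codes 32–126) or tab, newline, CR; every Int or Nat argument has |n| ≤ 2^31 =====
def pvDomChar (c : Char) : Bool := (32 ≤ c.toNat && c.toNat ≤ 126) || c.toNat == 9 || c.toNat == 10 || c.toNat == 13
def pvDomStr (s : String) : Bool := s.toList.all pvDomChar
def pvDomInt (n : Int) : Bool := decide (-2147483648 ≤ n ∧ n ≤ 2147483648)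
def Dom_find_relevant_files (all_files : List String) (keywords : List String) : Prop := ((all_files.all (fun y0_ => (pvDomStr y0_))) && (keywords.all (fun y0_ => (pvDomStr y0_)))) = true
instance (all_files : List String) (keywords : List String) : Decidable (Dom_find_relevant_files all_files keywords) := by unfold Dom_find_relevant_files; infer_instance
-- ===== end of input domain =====

-- B replaces A's stable reverse sort of (file, score) pairs by a single scoring pass into
-- score→files dict buckets plus a descending sweep over the bounded score range (objective: alternative).

-- ===== PORT A =====
def find_relevant_files (all_files : List String) (keywords : List String) : List String :=
  let kw_lower := keywords.map (fun kw => PySem.Str.lower kw)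
  let score : String → Int := fun fp =>
    (kw_lower.map (fun kw => if PySem.Str.isIn kw (PySem.Str.lower fp) then (1 : Int) else 0)).sum
  let scored := PySem.List.sorted (all_files.map (fun f => (f, score f))) (fun x => x.2) true
  let matched := (scored.filter (fun p => decide (0 < p.2))).map (fun p => p.1)
  let matched := if matched.isEmpty then (PySem.List.slice scored none (some 5)).map (fun p => p.1) else matched
  PySem.List.slice matched none (some 5)

-- ===== PORT B =====
def find_relevant_files_alt (all_files : List String) (keywords : List String) : List String :=
  let kw_lower := keywords.map (fun kw => PySem.Str.lower kw)
  let buckets : PySem.Dict Int (List String) :=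
    all_files.foldl (fun d f =>
      let fl := PySem.Str.lower f
      let s := (kw_lower.map (fun kw => if PySem.Str.isIn kw fl then (1 : Int) else 0)).sum
      d.modify s [] (fun l => l ++ [f])) PySem.Dict.empty
  let matched := (PySem.List.pyRange (keywords.length : Int) 0 (-1)).foldl
      (fun acc s => acc ++ buckets.getD s []) []
  let matched := if matched.isEmpty then PySem.List.slice all_files none (some 5) else matched
  PySem.List.slice matched none (some 5)

-- ===== PRECONDITION & SPEC =====
def Spec_find_relevant_files (all_files : List String) (keywords : List String) (out : List String) : Prop := out = find_relevant_files_alt all_files keywords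
instance (all_files : List String) (keywords : List String) (out : List String) : Decidable (Spec_find_relevant_files all_files keywords out) := by unfold Spec_find_relevant_files; infer_instance

-- ===== CLAIM (what is proved, stated in full; the proofs are below) =====
def Claim_equal_find_relevant_files : Prop := ∀ (all_files : List String) (keywords : List String), Dom_find_relevant_files all_files keywords → Spec_find_relevant_files all_files keywords (find_relevant_files all_files keywords)

-- ===== LEMMAS AND PROOFS =====

-- the score a file gets, as both ports compute it
def pvSc (kws : List String) (fp : String) : Int :=
  (kws.map (fun kw => if PySem.Str.isIn kw (PySem.Str.lower fp) then (1 : Int) else 0)).sum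

lemma pvSc_bounds (kws : List String) (fp : String) : 0 ≤ pvSc kws fp ∧ pvSc kws fp ≤ kws.length := by
  unfold pvSc
  rw [PySem.List.sum_map_ite_one_zero (fun kw => PySem.Str.isIn kw (PySem.Str.lower fp)) kws]
  constructor
  · positivity
  · exact_mod_cast List.countP_le_length

-- buckets of (file, score) pairs, by score n, n-1, …, 0
def pvDescBuckets (n : Nat) (xs : List (String × Int)) : List (String × Int) :=
  match n with
  | 0 => xs.filter (fun p => p.2 == 0)
  | Nat.succ m => xs.filter (fun p => p.2 == ((m + 1 : Nat) : Int)) ++ pvDescBuckets m xs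

lemma pvDescBuckets_nil (n : Nat) : pvDescBuckets n [] = [] := by
  induction n with
  | zero => rfl
  | succ m ih => simp [pvDescBuckets, ih]

lemma mem_pvDescBuckets {q : String × Int} {n : Nat} {xs : List (String × Int)}
    (h : q ∈ pvDescBuckets n xs) : q ∈ xs ∧ q.2 ≤ (n : Int) := by
  induction n with
  | zero =>
    simp only [pvDescBuckets, List.mem_filter, beq_iff_eq] at h
    exact ⟨h.1, by omega⟩
  | succ m ih =>
    simp only [pvDescBuckets, List.mem_append, List.mem_filter, beq_iff_eq] at h
    rcases h with ⟨h1, h2⟩ | h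
    · exact ⟨h1, by omega⟩
    · obtain ⟨h1, h2⟩ := ih h
      exact ⟨h1, by push_cast; omega⟩

lemma pvDescBuckets_append_high {n : Nat} {p : String × Int} (xs : List (String × Int))
    (hp : (n : Int) < p.2) : pvDescBuckets n (xs ++ [p]) = pvDescBuckets n xs := by
  induction n with
  | zero =>
    simp only [pvDescBuckets, List.filter_append]
    have h0 : p.2 ≠ 0 := by omega
    simp [h0]
  | succ m ih =>
    have h2 : (m : Int) < p.2 := by push_cast at hp ⊢; omega
    have h3 : p.2 ≠ ((m + 1 : Nat) : Int) := by push_cast at hp ⊢; omega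
    have hb : (p.2 == ((m + 1 : Nat) : Int)) = false := beq_eq_false_iff_ne.mpr h3
    simp only [pvDescBuckets, List.filter_append, ih h2, List.filter_singleton, hb]
    simp

lemma pvInsertBy_append_all {α : Type} (before : α → α → Bool) (x : α) (ys zs : List α)
    (h1 : ∀ y ∈ ys, before x y = false) (h2 : ∀ z ∈ zs, before x z = true) :
    PySem.List.insertBy before x (ys ++ zs) = ys ++ x :: zs := by
  induction ys with
  | nil =>
    cases zs with
    | nil => rfl
    | cons z zs => simp [PySem.List.insertBy, h2 z (by simp)]
  | cons y ys ih =>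
    have hy : before x y = false := h1 y (by simp)
    simp only [List.cons_append, PySem.List.insertBy, hy]
    simp only [Bool.false_eq_true, if_false, List.cons.injEq, true_and]
    exact ih (fun y hy => h1 y (by simp [hy]))

lemma pvInsertBy_append_left {α : Type} (before : α → α → Bool) (x : α) (ys zs : List α)
    (h1 : ∀ y ∈ ys, before x y = false) :
    PySem.List.insertBy before x (ys ++ zs) = ys ++ PySem.List.insertBy before x zs := by
  induction ys with
  | nil => rfl
  | cons y ys ih =>
    have hy : before x y = false := h1 y (by simp)
    simp only [List.cons_append, PySem.List.insertBy, hy]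
    simp only [Bool.false_eq_true, if_false, List.cons.injEq, true_and]
    exact ih (fun y hy => h1 y (by simp [hy]))

lemma pvInsertBy_descBuckets (n : Nat) (p : String × Int) (xs : List (String × Int))
    (hp : 0 ≤ p.2 ∧ p.2 ≤ (n : Int)) :
    PySem.List.insertBy (fun a b => decide (b.2 < a.2)) p (pvDescBuckets n xs)
      = pvDescBuckets n (xs ++ [p]) := by
  induction n generalizing xs with
  | zero =>
    have hp0 : p.2 = 0 := by omega
    simp only [pvDescBuckets, List.filter_append]
    rw [PySem.List.insertBy_of_forall_not_before]
    · simp [List.filter, hp0]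
    · intro y hy
      have : y.2 = 0 := by simpa using (List.mem_filter.mp hy).2
      simp [this, hp0]
  | succ m ih =>
    by_cases hcase : p.2 = ((m + 1 : Nat) : Int)
    · -- p belongs to the top bucket: it goes right after it
      rw [show pvDescBuckets (m + 1) xs
            = xs.filter (fun q => q.2 == ((m + 1 : Nat) : Int)) ++ pvDescBuckets m xs from rfl]
      rw [pvInsertBy_append_all _ p _ _
          (fun y hy => by
            have : y.2 = ((m + 1 : Nat) : Int) := by simpa using (List.mem_filter.mp hy).2
            simp [this, hcase])
          (fun z hz => by
            have := (mem_pvDescBuckets hz).2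
            simp only [decide_eq_true_eq]
            omega)]
      have hrest : pvDescBuckets m (xs ++ [p]) = pvDescBuckets m xs :=
        pvDescBuckets_append_high xs (by omega)
      simp only [pvDescBuckets, List.filter_append, hrest]
      simp [List.filter, hcase]
    · -- p has a smaller score: it is inserted past the top bucket
      have hple : p.2 ≤ (m : Int) := by push_cast at hp hcase ⊢; omega
      rw [show pvDescBuckets (m + 1) xs
            = xs.filter (fun q => q.2 == ((m + 1 : Nat) : Int)) ++ pvDescBuckets m xs from rfl]
      rw [pvInsertBy_append_left _ p _ _
          (fun y hy => by
            have : y.2 = ((m + 1 : Nat) : Int) := by simpa using (List.mem_filter.mp hy).2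
            simp only [decide_eq_false_iff_not, not_lt, this]
            omega)]
      rw [ih xs ⟨hp.1, hple⟩]
      have hb : (p.2 == ((m + 1 : Nat) : Int)) = false := beq_eq_false_iff_ne.mpr hcase
      simp only [pvDescBuckets, List.filter_append, List.filter_singleton, hb]
      simp

lemma pvSorted_eq_descBuckets (n : Nat) (xs : List (String × Int))
    (hxs : ∀ q ∈ xs, 0 ≤ q.2 ∧ q.2 ≤ (n : Int)) :
    PySem.List.sorted xs (fun p => p.2) true = pvDescBuckets n xs := by
  rw [PySem.List.sorted_rev_eq_foldl_insertBy]
  induction xs using List.reverseRecOn with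
  | nil => exact (pvDescBuckets_nil n).symm
  | append_singleton xs p ih =>
    rw [List.foldl_append]
    simp only [List.foldl_cons, List.foldl_nil]
    rw [ih (fun q hq => hxs q (by simp [hq]))]
    exact pvInsertBy_descBuckets n p xs (hxs p (by simp))

-- positive part of the buckets, as B's descending sweep produces it
lemma pvMatched_eq (n : Nat) (kws : List String) (all_files : List String) :
    ((pvDescBuckets n (all_files.map (fun f => (f, pvSc kws f)))).filter
        (fun p => decide (0 < p.2))).map (fun p => p.1)
      = (PySem.List.pyRange (n : Int) 0 (-1)).flatMap
          (fun s => all_files.filter (fun f => pvSc kws f == s)) := by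
  induction n with
  | zero =>
    rw [PySem.List.pyRange_neg_one_eq_nil (by omega)]
    simp only [pvDescBuckets, List.flatMap_nil, List.filter_filter]
    rw [List.filter_eq_nil_iff.mpr]
    · rfl
    · intro q _
      simp only [Bool.and_eq_true, beq_iff_eq, decide_eq_true_eq]
      omega
  | succ m ih =>
    rw [PySem.List.pyRange_neg_one_cons (a := ((m + 1 : Nat) : Int)) (by push_cast; omega)]
    have hsub : ((m + 1 : Nat) : Int) - 1 = (m : Int) := by push_cast; omega
    rw [hsub]
    simp only [pvDescBuckets, List.filter_append, List.map_append, List.flatMap_cons, ih]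
    congr 1
    rw [List.filter_filter]
    have h1 : (List.filter
        (fun q => ((decide (0 < q.2)) && (q.2 == ((m + 1 : Nat) : Int))))
        (all_files.map (fun f => (f, pvSc kws f))))
        = List.filter (fun q => q.2 == ((m + 1 : Nat) : Int))
            (all_files.map (fun f => (f, pvSc kws f))) := by
      apply List.filter_congr
      intro q _
      by_cases h : q.2 = ((m + 1 : Nat) : Int)
      · simp [h]
      · simp
        intro hq
        omega
    rw [h1, List.filter_map, List.map_map]
    simp [Function.comp_def]

-- B's dict of buckets looks up to exactly the files of that score, in input order
lemma pvBuckets_getD (kws : List String) (all_files : List String) (s : Int) :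
    (all_files.foldl (fun d f => d.modify (pvSc kws f) [] (fun l => l ++ [f]))
        (PySem.Dict.empty : PySem.Dict Int (List String))).getD s []
      = all_files.filter (fun f => pvSc kws f == s) := by
  have hmap : (all_files.foldl (fun d f => d.modify (pvSc kws f) [] (fun l => l ++ [f]))
        (PySem.Dict.empty : PySem.Dict Int (List String)))
      = ((all_files.map (fun f => (pvSc kws f, f))).foldl
          (fun d p => d.modify p.1 [] (fun l => l ++ [p.2])) PySem.Dict.empty) := by
    rw [List.foldl_map]
  rw [hmap, PySem.Dict.getD_foldl_modify_append, List.filter_map, List.map_map]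
  simp [Function.comp_def]

-- the two ports, with the lets zeta-reduced and the score written as pvSc
lemma pvCore (all_files kws : List String) (n : Nat) (hK : kws.length = n) :
    PySem.List.slice
      (if ((((PySem.List.sorted (all_files.map (fun f => (f, pvSc kws f))) (fun x => x.2) true).filter
              (fun p => decide (0 < p.2))).map (fun p => p.1)).isEmpty)
        then (PySem.List.slice (PySem.List.sorted (all_files.map (fun f => (f, pvSc kws f))) (fun x => x.2) true) none (some 5)).map (fun p => p.1)
        else ((PySem.List.sorted (all_files.map (fun f => (f, pvSc kws f))) (fun x => x.2) true).filter
              (fun p => decide (0 < p.2))).map (fun p => p.1))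
      none (some 5)
    = PySem.List.slice
      (if (((PySem.List.pyRange (n : Int) 0 (-1)).foldl
              (fun acc s => acc ++ (all_files.foldl (fun d f => d.modify (pvSc kws f) [] (fun l => l ++ [f]))
                (PySem.Dict.empty : PySem.Dict Int (List String))).getD s []) []).isEmpty)
        then PySem.List.slice all_files none (some 5)
        else ((PySem.List.pyRange (n : Int) 0 (-1)).foldl
              (fun acc s => acc ++ (all_files.foldl (fun d f => d.modify (pvSc kws f) [] (fun l => l ++ [f]))
                (PySem.Dict.empty : PySem.Dict Int (List String))).getD s []) []))
      none (some 5) := by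
  subst hK
  have hb : ∀ q ∈ all_files.map (fun f => (f, pvSc kws f)), 0 ≤ q.2 ∧ q.2 ≤ (kws.length : Int) := by
    intro q hq
    simp only [List.mem_map] at hq
    obtain ⟨f, _, rfl⟩ := hq
    exact pvSc_bounds kws f
  rw [pvSorted_eq_descBuckets kws.length _ hb]
  rw [PySem.List.foldl_append_eq_flatMap]
  simp only [pvBuckets_getD, List.nil_append, pvMatched_eq kws.length kws all_files]
  by_cases hM : ((PySem.List.pyRange (kws.length : Int) 0 (-1)).flatMap
      (fun s => all_files.filter (fun f => pvSc kws f == s))).isEmpty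
  · -- no file matched: every score is 0, so the sorted list is the input order
    have hz : ∀ f ∈ all_files, pvSc kws f = 0 := by
      intro f hf
      obtain ⟨h0, h1⟩ := pvSc_bounds kws f
      by_contra hne
      have hpos : 0 < pvSc kws f := by omega
      have hmem : f ∈ (PySem.List.pyRange (kws.length : Int) 0 (-1)).flatMap
          (fun s => all_files.filter (fun f => pvSc kws f == s)) := by
        apply List.mem_flatMap.mpr
        exact ⟨pvSc kws f, PySem.List.mem_pyRange_neg_one.mpr ⟨hpos, h1⟩,
          List.mem_filter.mpr ⟨hf, by simp⟩⟩
      rw [List.isEmpty_iff] at hM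
      simp [hM] at hmem
    have hdesc : pvDescBuckets kws.length (all_files.map (fun f => (f, pvSc kws f)))
        = all_files.map (fun f => (f, pvSc kws f)) := by
      rw [← pvSorted_eq_descBuckets kws.length _ hb]
      apply PySem.List.sorted_rev_eq_self_of_pairwise
      apply List.pairwise_of_forall_mem_list
      intro a ha b hb'
      simp only [List.mem_map] at ha hb'
      obtain ⟨f, hf, rfl⟩ := ha
      obtain ⟨g, hg, rfl⟩ := hb'
      simp [hz f hf, hz g hg]
    rw [if_pos hM, if_pos hM, hdesc]
    congr 1
    rw [PySem.List.slice_to (List.map (fun f => (f, pvSc kws f)) all_files) (by norm_num),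
      PySem.List.slice_to all_files (by norm_num), ← List.map_take]
    simp [Function.comp_def]
  · rw [if_neg hM, if_neg hM]

-- ===== VERDICT (by name: the statement is the Claim_ definition above) =====
theorem find_relevant_files_spec : Claim_equal_find_relevant_files := by
  intro all_files keywords _
  unfold Spec_find_relevant_files
  exact pvCore all_files (keywords.map (fun kw => PySem.Str.lower kw)) keywords.length
    (by simp)
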